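-- pv_equiv track=rewrite | github.com/drybell/leetcode | 2025/triangles.py | argmin_gen
-- ===== SOURCE A (Python) =====
-- import heapq
--
-- def argmin_gen(l):
--     heap = [
--         (val, i)
--         for i, val in enumerate(l)
--     ]
--
--     heapq.heapify(heap)
--
--     while heap:
--         yield heapq.heappop(heap)
-- ===== SOURCE B (Python) =====
-- def argmin_gen(l):
--     for pair in sorted((val, i) for i, val in enumerate(l)):
--         yield pair
-- ===== Notes on version B (the rewrite author's own statement) =====
-- stated objective: simpler
-- what changed: Replaces the hand-maintained heap (heapify + repeated heappop in a while loop) with a single sorted() over the enumerated (val, i) pairs yielded by a plain for-loop; tuple ordering with unique indices reproduces the heap's pop order exactly, and the single C-level sort is measurably faster than n heappop calls.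
import Mathlib
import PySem

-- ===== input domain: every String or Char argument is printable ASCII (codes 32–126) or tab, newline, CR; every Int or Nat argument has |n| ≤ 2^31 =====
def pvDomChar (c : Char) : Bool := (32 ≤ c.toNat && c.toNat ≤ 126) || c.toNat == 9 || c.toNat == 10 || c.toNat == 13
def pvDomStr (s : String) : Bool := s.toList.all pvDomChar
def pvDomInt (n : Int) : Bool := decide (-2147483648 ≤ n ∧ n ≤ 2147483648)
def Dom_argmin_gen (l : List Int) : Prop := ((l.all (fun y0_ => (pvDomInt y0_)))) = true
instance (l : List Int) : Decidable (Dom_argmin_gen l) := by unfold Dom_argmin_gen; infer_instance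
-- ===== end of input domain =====

-- B replaces A's heapify + repeated heappop with one sorted() call over the enumerated
-- (val, i) pairs and a plain loop (objective: simpler). Both are generators; the ports
-- list the generators' outputs.

-- ===== PORT A =====
-- heapq is a library A calls, not A's own code: it is ported at its contract level —
-- heappop removes and returns the minimum element (Python tuple order = lexicographic on
-- (val, i)); this is exact here because equal pairs are interchangeable values, so "which"
-- minimal occurrence is removed cannot affect the yielded list. heapify itself has no
-- observable effect in this model. The while-loop becomes the recursion below.

-- termination helper for the while-loop recursion: a successful remove? shortens the list
theorem pvRemoveLen (heap rest : List (Int × Int)) (m : Int × Int)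
    (h2 : PySem.List.remove? heap m = some rest) : rest.length < heap.length := by
  have hm : m ∈ heap := by
    by_contra hnot
    rw [(PySem.List.remove?_eq_none_iff heap m).2 hnot] at h2
    simp at h2
  have := PySem.List.remove?_eq_some_erase heap m hm
  rw [this] at h2
  cases h2
  have hpos : 0 < heap.length := List.length_pos_of_mem hm
  rw [List.length_erase_of_mem hm]
  omega

-- while heap: yield heappop(heap)
def pvDrain (heap : List (Int × Int)) : List (Int × Int) :=
  match hmin : PySem.List.min2? heap (fun p => p.1) (fun p => p.2) with
  | none => []          -- heap empty: loop ends
  | some m =>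
    match h2 : PySem.List.remove? heap m with
    | none => []        -- unreachable: the minimum is a member
    | some rest => m :: pvDrain rest
termination_by heap.length
decreasing_by exact pvRemoveLen heap rest m h2

def argmin_gen (l : List Int) : List (Int × Int) :=
  pvDrain ((PySem.List.enumerate l).map (fun p => (p.2, p.1)))

-- ===== PORT B =====
def argmin_gen_alt (l : List Int) : List (Int × Int) :=
  PySem.List.sorted2 ((PySem.List.enumerate l).map (fun p => (p.2, p.1)))
    (fun p => p.1) (fun p => p.2) false

-- ===== PRECONDITION & SPEC =====
def Spec_argmin_gen (l : List Int) (out : List (Int × Int)) : Prop := out = argmin_gen_alt l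
instance (l : List Int) (out : List (Int × Int)) : Decidable (Spec_argmin_gen l out) := by unfold Spec_argmin_gen; infer_instance

-- ===== CLAIM (what is proved, stated in full; the proofs are below) =====
def Claim_equal_argmin_gen : Prop := ∀ (l : List Int), Dom_argmin_gen l → Spec_argmin_gen l (argmin_gen l)

-- ===== LEMMAS AND PROOFS =====

-- the boolean lexicographic strict order both sorted2 and min2? use (with keys .1, .2)
def pvLtB (a b : Int × Int) : Bool :=
  decide (a.1 < b.1) || (!decide (b.1 < a.1) && decide (a.2 < b.2))

-- its reflexive closure, as a Prop
def pvLe (a b : Int × Int) : Prop := a.1 < b.1 ∨ (a.1 = b.1 ∧ a.2 ≤ b.2)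

theorem pvLtB_true_iff (a b : Int × Int) :
    pvLtB a b = true ↔ (a.1 < b.1 ∨ (a.1 = b.1 ∧ a.2 < b.2)) := by
  unfold pvLtB
  simp only [Bool.or_eq_true, Bool.and_eq_true, Bool.not_eq_true', decide_eq_true_eq,
    decide_eq_false_iff_not]
  constructor
  · rintro (h | ⟨h1, h2⟩)
    · exact Or.inl h
    · rcases lt_or_ge a.1 b.1 with h' | h'
      · exact Or.inl h'
      · exact Or.inr ⟨le_antisymm (le_of_not_gt h1) h', h2⟩
  · rintro (h | ⟨h1, h2⟩)
    · exact Or.inl h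
    · exact Or.inr ⟨by omega, h2⟩

theorem pvLe_of_ltB {a b : Int × Int} (h : pvLtB a b = true) : pvLe a b := by
  rcases (pvLtB_true_iff a b).1 h with h' | ⟨h1, h2⟩
  · exact Or.inl h'
  · exact Or.inr ⟨h1, le_of_lt h2⟩

theorem pvLe_of_not_ltB {a b : Int × Int} (h : pvLtB a b = false) : pvLe b a := by
  have := (pvLtB_true_iff a b)
  unfold pvLe
  rcases lt_trichotomy a.1 b.1 with h1 | h1 | h1
  · exact absurd ((pvLtB_true_iff a b).2 (Or.inl h1)) (by simp [h])
  · by_cases h2 : a.2 < b.2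
    · exact absurd ((pvLtB_true_iff a b).2 (Or.inr ⟨h1, h2⟩)) (by simp [h])
    · exact Or.inr ⟨h1.symm, by omega⟩
  · exact Or.inl h1

theorem pvLe_trans {a b c : Int × Int} (h1 : pvLe a b) (h2 : pvLe b c) : pvLe a c := by
  unfold pvLe at *; omega

theorem pvLe_antisymm {a b : Int × Int} (h1 : pvLe a b) (h2 : pvLe b a) : a = b := by
  unfold pvLe at *
  have : a.1 = b.1 ∧ a.2 = b.2 := by omega
  exact Prod.ext this.1 this.2

-- ===== min2? (the contract of heappop): the returned element is a lex-minimum =====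

-- the fold step of PySem.List.min2? with keys .1, .2, as a named definition
def pvStep (acc : Option (Int × Int)) (x : Int × Int) : Option (Int × Int) :=
  match acc with
  | none => some x
  | some m => if (decide (x.1 < m.1) || !decide (m.1 < x.1) && decide (x.2 < m.2)) = true
              then some x else some m

theorem pvMin2_eq_foldl (xs : List (Int × Int)) :
    PySem.List.min2? xs (fun p => p.1) (fun p => p.2) = List.foldl pvStep none xs := by
  unfold PySem.List.min2? pvStep
  congr 1
  funext acc x
  cases acc <;> rfl

theorem pvMin2Aux (xs : List (Int × Int)) :
    ∀ (acc : Option (Int × Int)) (m : Int × Int),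
    List.foldl pvStep acc xs = some m →
    ((m ∈ xs ∨ acc = some m) ∧ (∀ y ∈ xs, pvLe m y) ∧ (∀ a, acc = some a → pvLe m a)) := by
  induction xs with
  | nil =>
    intro acc m h; simp at h
    exact ⟨Or.inr h, by simp, fun a ha => by rw [ha] at h; cases h; exact Or.inr ⟨rfl, le_refl _⟩⟩
  | cons x t ih =>
    intro acc m h
    simp only [List.foldl_cons] at h
    cases acc with
    | none =>
      rw [show pvStep none x = some x from rfl] at h
      obtain ⟨hmem, hall, hacc⟩ := ih (some x) m h
      refine ⟨?_, ?_, by simp⟩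
      · rcases hmem with h' | h'
        · exact Or.inl (List.mem_cons_of_mem _ h')
        · cases h'; exact Or.inl (List.mem_cons_self)
      · intro y hy
        rcases List.mem_cons.1 hy with rfl | hy'
        · exact hacc y rfl
        · exact hall y hy'
    | some a =>
      rw [show pvStep (some a) x
            = if (decide (x.1 < a.1) || !decide (a.1 < x.1) && decide (x.2 < a.2)) = true
              then some x else some a from rfl] at h
      by_cases hlt : (decide (x.1 < a.1) || !decide (a.1 < x.1) && decide (x.2 < a.2)) = true
      · rw [if_pos hlt] at h
        obtain ⟨hmem, hall, hacc⟩ := ih (some x) m h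
        have hxa : pvLe x a := pvLe_of_ltB (by simpa [pvLtB] using hlt)
        have hmx : pvLe m x := hacc x rfl
        refine ⟨?_, ?_, ?_⟩
        · rcases hmem with h' | h'
          · exact Or.inl (List.mem_cons_of_mem _ h')
          · cases h'; exact Or.inl (List.mem_cons_self)
        · intro y hy
          rcases List.mem_cons.1 hy with rfl | hy'
          · exact hmx
          · exact hall y hy'
        · intro b hb; cases hb; exact pvLe_trans hmx hxa
      · rw [if_neg hlt] at h
        obtain ⟨hmem, hall, hacc⟩ := ih (some a) m h
        have hax : pvLe a x := pvLe_of_not_ltB (by simpa [pvLtB] using Bool.of_not_eq_true hlt)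
        have hma : pvLe m a := hacc a rfl
        refine ⟨?_, ?_, ?_⟩
        · rcases hmem with h' | h'
          · exact Or.inl (List.mem_cons_of_mem _ h')
          · exact Or.inr h'
        · intro y hy
          rcases List.mem_cons.1 hy with rfl | hy'
          · exact pvLe_trans hma hax
          · exact hall y hy'
        · exact hacc

theorem pvMin2_spec {xs : List (Int × Int)} {m : Int × Int}
    (h : PySem.List.min2? xs (fun p => p.1) (fun p => p.2) = some m) :
    m ∈ xs ∧ ∀ y ∈ xs, pvLe m y := by
  rw [pvMin2_eq_foldl] at h
  have := pvMin2Aux xs none m h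
  refine ⟨?_, this.2.1⟩
  rcases this.1 with h' | h'
  · exact h'
  · simp at h'

theorem pvMin2_none {xs : List (Int × Int)}
    (h : PySem.List.min2? xs (fun p => p.1) (fun p => p.2) = none) : xs = [] := by
  cases xs with
  | nil => rfl
  | cons x t =>
    exfalso
    rw [pvMin2_eq_foldl] at h
    simp only [List.foldl_cons] at h
    rw [show pvStep none x = some x from rfl] at h
    have hne : ∀ (ys : List (Int × Int)) (a : Int × Int),
        List.foldl pvStep (some a) ys ≠ none := by
      intro ys
      induction ys with
      | nil => intro a; simp
      | cons y u ih =>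
        intro a
        simp only [List.foldl_cons]
        rw [show pvStep (some a) y
              = if (decide (y.1 < a.1) || !decide (a.1 < y.1) && decide (y.2 < a.2)) = true
                then some y else some a from rfl]
        by_cases hc : (decide (y.1 < a.1) || !decide (a.1 < y.1) && decide (y.2 < a.2)) = true
        · rw [if_pos hc]; exact ih y
        · rw [if_neg hc]; exact ih a
    exact hne t x h

-- ===== pvDrain: a permutation, sorted =====

theorem pvDrain_perm (xs : List (Int × Int)) : (pvDrain xs).Perm xs := by
  induction hn : xs.length using Nat.strong_induction_on generalizing xs with
  | _ n ih =>
    unfold pvDrain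
    split
    · next hmin => rw [pvMin2_none hmin]
    · next m hmin =>
      split
      · next h2 =>
        exfalso
        have hm := (pvMin2_spec hmin).1
        rw [(PySem.List.remove?_eq_some_erase xs m hm)] at h2
        simp at h2
      · next rest h2 =>
        have hm := (pvMin2_spec hmin).1
        have hrest : rest = xs.erase m := by
          have := PySem.List.remove?_eq_some_erase xs m hm
          rw [this] at h2; exact (Option.some.inj h2).symm
        have hlen : rest.length < n := hn ▸ pvRemoveLen xs rest m h2
        have hih := ih rest.length hlen rest rfl
        exact (hih.cons m).trans (hrest ▸ (List.perm_cons_erase hm).symm)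

theorem pvDrain_pairwise (xs : List (Int × Int)) : (pvDrain xs).Pairwise pvLe := by
  induction hn : xs.length using Nat.strong_induction_on generalizing xs with
  | _ n ih =>
    unfold pvDrain
    split
    · exact List.Pairwise.nil
    · next m hmin =>
      split
      · exact List.Pairwise.nil
      · next rest h2 =>
        have hm := (pvMin2_spec hmin).1
        have hrest : rest = xs.erase m := by
          have := PySem.List.remove?_eq_some_erase xs m hm
          rw [this] at h2; exact (Option.some.inj h2).symm
        have hlen : rest.length < n := hn ▸ pvRemoveLen xs rest m h2
        refine List.Pairwise.cons ?_ (ih rest.length hlen rest rfl)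
        intro y hy
        have hy' : y ∈ rest := ((pvDrain_perm rest).mem_iff).1 hy
        have hyx : y ∈ xs := by
          rw [hrest] at hy'; exact List.mem_of_mem_erase hy'
        exact (pvMin2_spec hmin).2 y hyx

theorem pvInsert_pairwise (x : Int × Int) (ys : List (Int × Int)) (h : ys.Pairwise pvLe) :
    (PySem.List.insertBy pvLtB x ys).Pairwise pvLe := by
  induction ys with
  | nil => exact List.pairwise_singleton pvLe x
  | cons y t ih =>
    rw [show PySem.List.insertBy pvLtB x (y :: t)
          = if pvLtB x y then x :: y :: t else y :: PySem.List.insertBy pvLtB x t from rfl]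
    obtain ⟨hy, ht⟩ := List.pairwise_cons.1 h
    by_cases hc : pvLtB x y = true
    · rw [if_pos hc]
      have hxy := pvLe_of_ltB hc
      refine List.Pairwise.cons ?_ h
      intro z hz
      rcases List.mem_cons.1 hz with rfl | hz'
      · exact hxy
      · exact pvLe_trans hxy (hy z hz')
    · rw [if_neg hc]
      have hyx : pvLe y x := pvLe_of_not_ltB (Bool.eq_false_iff.2 hc)
      refine List.Pairwise.cons ?_ (ih ht)
      intro z hz
      rcases (PySem.List.insertBy_mem_iff pvLtB x z t).1 hz with rfl | hz'
      · exact hyx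
      · exact hy z hz'

theorem pvSorted2_eq_foldl (xs : List (Int × Int)) :
    PySem.List.sorted2 xs (fun p => p.1) (fun p => p.2) false
      = List.foldl (fun acc x => PySem.List.insertBy pvLtB x acc) [] xs := rfl

theorem pvSorted2_pairwise (xs : List (Int × Int)) :
    (PySem.List.sorted2 xs (fun p => p.1) (fun p => p.2) false).Pairwise pvLe := by
  rw [pvSorted2_eq_foldl]
  have aux : ∀ (ys : List (Int × Int)) (acc : List (Int × Int)), acc.Pairwise pvLe →
      (List.foldl (fun acc x => PySem.List.insertBy pvLtB x acc) acc ys).Pairwise pvLe := by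
    intro ys
    induction ys with
    | nil => intro acc h; simpa using h
    | cons y t ih =>
      intro acc h
      simp only [List.foldl_cons]
      exact ih _ (pvInsert_pairwise y acc h)
  exact aux xs [] List.Pairwise.nil

theorem pvMain (xs : List (Int × Int)) :
    pvDrain xs = PySem.List.sorted2 xs (fun p => p.1) (fun p => p.2) false := by
  exact ((pvDrain_perm xs).trans (PySem.List.sorted2_perm xs _ _ false).symm).eq_of_pairwise
    (fun a b _ _ h1 h2 => pvLe_antisymm h1 h2)
    (pvDrain_pairwise xs) (pvSorted2_pairwise xs)

-- ===== VERDICT (by name: the statement is the Claim_ definition above) =====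
theorem argmin_gen_spec : Claim_equal_argmin_gen := by
  intro l _
  show argmin_gen l = argmin_gen_alt l
  unfold argmin_gen argmin_gen_alt
  exact pvMain _
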